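-- pv_equiv track=rewrite | github.com/MrBrantCode/unitest_baseline | mut_generate/mist_train_cf/cf_87040/solution.py | multiply_roman_numerals
-- ===== SOURCE A (Python) =====
-- def multiply_roman_numerals(num1, num2):
--     roman_values = {'I': 1, 'V': 5, 'X': 10, 'L': 50, 'C': 100, 'D': 500, 'M': 1000}
--     integer_values = [(1000, 'M'), (900, 'CM'), (500, 'D'), (400, 'CD'), (100, 'C'), (90, 'XC'),
--                       (50, 'L'), (40, 'XL'), (10, 'X'), (9, 'IX'), (5, 'V'), (4, 'IV'), (1, 'I')]
--
--     def roman_to_integer(roman):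
--         result = 0
--         prev_value = 0
--         for char in roman[::-1]:
--             value = roman_values[char]
--             if value < prev_value:
--                 result -= value
--             else:
--                 result += value
--             prev_value = value
--         return result
--
--     def integer_to_roman(integer):
--         result = ''
--         for value, roman in integer_values:
--             while integer >= value:
--                 result += roman
--                 integer -= value
--         return result
--
--     try:
--         integer1 = roman_to_integer(num1)
--         integer2 = roman_to_integer(num2)
--     except KeyError:
--         return "Invalid Roman numeral input"
--
--     product = integer1 * integer2
--     if product > 1000:
--         return "Product exceeds 1000"
--
--     return integer_to_roman(product)
-- ===== SOURCE B (Python) =====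
-- def multiply_roman_numerals(num1, num2):
--     values = {'I': 1, 'V': 5, 'X': 10, 'L': 50, 'C': 100, 'D': 500, 'M': 1000}
--
--     def roman_to_integer(roman):
--         total = 0
--         n = len(roman)
--         for i in range(n):
--             v = values[roman[i]]
--             if i + 1 < n and v < values[roman[i + 1]]:
--                 total -= v
--             else:
--                 total += v
--         return total
--
--     try:
--         product = roman_to_integer(num1) * roman_to_integer(num2)
--     except KeyError:
--         return "Invalid Roman numeral input"
--
--     if product > 1000:
--         return "Product exceeds 1000"
--
--     thousands = ['', 'M']
--     hundreds = ['', 'C', 'CC', 'CCC', 'CD', 'D', 'DC', 'DCC', 'DCCC', 'CM']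
--     tens = ['', 'X', 'XX', 'XXX', 'XL', 'L', 'LX', 'LXX', 'LXXX', 'XC']
--     units = ['', 'I', 'II', 'III', 'IV', 'V', 'VI', 'VII', 'VIII', 'IX']
--     return (thousands[product // 1000] + hundreds[product % 1000 // 100]
--             + tens[product % 100 // 10] + units[product % 10])
-- ===== Notes on version B (the rewrite author's own statement) =====
-- stated objective: idiomatic
-- what changed: integer-to-Roman is rebuilt from per-decimal-digit lookup tables (thousands/hundreds/tens/units indexed by the product's digits) instead of A's greedy subtraction over 13 value-symbol pairs, and Roman-to-integer becomes a single forward scan with lookahead instead of A's reversed scan with carried previous value.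
import Mathlib
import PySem

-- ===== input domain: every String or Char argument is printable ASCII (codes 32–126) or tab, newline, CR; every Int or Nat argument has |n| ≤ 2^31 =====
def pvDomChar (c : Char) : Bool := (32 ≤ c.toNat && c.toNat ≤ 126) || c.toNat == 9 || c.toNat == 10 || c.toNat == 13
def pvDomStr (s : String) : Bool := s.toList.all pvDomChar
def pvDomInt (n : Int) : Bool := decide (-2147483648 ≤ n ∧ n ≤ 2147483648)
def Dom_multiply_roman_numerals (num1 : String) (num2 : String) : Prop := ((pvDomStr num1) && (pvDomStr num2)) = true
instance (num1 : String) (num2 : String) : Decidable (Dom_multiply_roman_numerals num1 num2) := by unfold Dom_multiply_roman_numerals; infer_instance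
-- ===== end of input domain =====

-- B replaces A's greedy subtraction loop for integer→Roman by per-decimal-digit lookup
-- tables and A's reversed scan by a forward scan with lookahead (objective: idiomatic).

-- ===== PORT A =====

def romanValuesA : PySem.Dict Char Int :=
  PySem.Dict.ofList [('I', 1), ('V', 5), ('X', 10), ('L', 50), ('C', 100), ('D', 500), ('M', 1000)]

def integerValuesA : List (Int × String) :=
  [(1000, "M"), (900, "CM"), (500, "D"), (400, "CD"), (100, "C"), (90, "XC"),
   (50, "L"), (40, "XL"), (10, "X"), (9, "IX"), (5, "V"), (4, "IV"), (1, "I")]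

-- the for-loop of roman_to_integer over roman[::-1]; state (result, prev_value);
-- none = KeyError on the dict lookup
def r2iLoopA : List Char → Int × Int → Option (Int × Int)
  | [], s => some s
  | c :: cs, (result, prev) =>
    match romanValuesA.get? c with
    | none => none
    | some value =>
      r2iLoopA cs ((if value < prev then result - value else result + value), value)

def romanToIntegerA (roman : String) : Option Int :=
  -- slice? with step -1 is never none (none only for step 0)
  (r2iLoopA ((PySem.List.slice? roman.toList none none (-1)).getD []) (0, 0)).map (·.1)

-- the inner 'while integer >= value' loop; fuel ≥ integer.toNat is enough since value ≥ 1
def i2rWhileA (fuel : Nat) (integer : Int) (value : Int) (roman : String) (result : String) :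
    String × Int :=
  match fuel with
  | 0 => (result, integer)
  | fuel + 1 =>
    if integer ≥ value then i2rWhileA fuel (integer - value) value roman (result ++ roman)
    else (result, integer)

-- the outer 'for value, roman in integer_values' loop
def i2rLoopA : List (Int × String) → Int → String → String
  | [], _, result => result
  | (value, roman) :: rest, integer, result =>
    let (result', integer') := i2rWhileA (integer.toNat + 1) integer value roman result
    i2rLoopA rest integer' result'

def integerToRomanA (integer : Int) : String := i2rLoopA integerValuesA integer ""

def multiply_roman_numerals (num1 : String) (num2 : String) : String :=
  match romanToIntegerA num1 with
  | none => "Invalid Roman numeral input"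
  | some integer1 =>
    match romanToIntegerA num2 with
    | none => "Invalid Roman numeral input"
    | some integer2 =>
      let product := integer1 * integer2
      if product > 1000 then "Product exceeds 1000"
      else integerToRomanA product

-- ===== PORT B =====

def romanValuesB : PySem.Dict Char Int :=
  PySem.Dict.ofList [('I', 1), ('V', 5), ('X', 10), ('L', 50), ('C', 100), ('D', 500), ('M', 1000)]

-- forward scan: contribution of roman[i] is -v when the next char has a larger value;
-- lookahead lookup can raise KeyError too, as in Source B
def r2iLoopB : List Char → Int → Option Int
  | [], total => some total
  | c :: cs, total =>
    match romanValuesB.get? c with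
    | none => none
    | some v =>
      match cs with
      | [] => some (total + v)
      | c2 :: _ =>
        match romanValuesB.get? c2 with
        | none => none
        | some v2 => r2iLoopB cs (if v < v2 then total - v else total + v)

def romanToIntegerB (roman : String) : Option Int := r2iLoopB roman.toList 0

def thousandsB : List String := ["", "M"]
def hundredsB : List String := ["", "C", "CC", "CCC", "CD", "D", "DC", "DCC", "DCCC", "CM"]
def tensB : List String := ["", "X", "XX", "XXX", "XL", "L", "LX", "LXX", "LXXX", "XC"]
def unitsB : List String := ["", "I", "II", "III", "IV", "V", "VI", "VII", "VIII", "IX"]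

-- the four indices are in range for every product that reaches this point (0 ≤ p ≤ 1000),
-- so the default of pyGet? is never taken on admitted inputs
def digitsToRomanB (p : Int) : String :=
  (PySem.List.pyGet? thousandsB (PySem.Int.floordiv p 1000)).getD "" ++
  (PySem.List.pyGet? hundredsB (PySem.Int.floordiv (PySem.Int.mod p 1000) 100)).getD "" ++
  (PySem.List.pyGet? tensB (PySem.Int.floordiv (PySem.Int.mod p 100) 10)).getD "" ++
  (PySem.List.pyGet? unitsB (PySem.Int.mod p 10)).getD ""

def multiply_roman_numerals_alt (num1 : String) (num2 : String) : String :=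
  match romanToIntegerB num1 with
  | none => "Invalid Roman numeral input"
  | some t1 =>
    match romanToIntegerB num2 with
    | none => "Invalid Roman numeral input"
    | some t2 =>
      let product := t1 * t2
      if product > 1000 then "Product exceeds 1000"
      else digitsToRomanB product

-- ===== PRECONDITION & SPEC =====
def Spec_multiply_roman_numerals (num1 : String) (num2 : String) (out : String) : Prop := out = multiply_roman_numerals_alt num1 num2
instance (num1 : String) (num2 : String) (out : String) : Decidable (Spec_multiply_roman_numerals num1 num2 out) := by unfold Spec_multiply_roman_numerals; infer_instance

-- ===== CLAIM (what is proved, stated in full; the proofs are below) =====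
def Claim_equal_multiply_roman_numerals : Prop := ∀ (num1 : String) (num2 : String), Dom_multiply_roman_numerals num1 num2 → Spec_multiply_roman_numerals num1 num2 (multiply_roman_numerals num1 num2)

-- ===== LEMMAS AND PROOFS =====

theorem valB_eq_valA : romanValuesB = romanValuesA := rfl

theorem valA_cases {c : Char} {v : Int} (h : romanValuesA.get? c = some v) :
    v = 1 ∨ v = 5 ∨ v = 10 ∨ v = 50 ∨ v = 100 ∨ v = 500 ∨ v = 1000 := by
  have hr : romanValuesA = PySem.Dict.mk
      [('I', 1), ('V', 5), ('X', 10), ('L', 50), ('C', 100), ('D', 500), ('M', 1000)] := by decide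
  rw [hr] at h
  simp only [PySem.Dict.get?_mk_cons] at h
  split_ifs at h <;> simp_all [PySem.Dict.get?]

theorem valA_pos {c : Char} {v : Int} (h : romanValuesA.get? c = some v) : 0 < v := by
  rcases valA_cases h with h' | h' | h' | h' | h' | h' | h' <;> omega

-- v < p for two looked-up values forces 2*v ≤ p
theorem valA_double {c d : Char} {v p : Int} (hv : romanValuesA.get? c = some v)
    (hp : romanValuesA.get? d = some p) (hlt : v < p) : 2 * v ≤ p := by
  rcases valA_cases hv with h' | h' | h' | h' | h' | h' | h' <;>
    rcases valA_cases hp with h'' | h'' | h'' | h'' | h'' | h'' | h'' <;> omega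

-- r2iLoopA distributes over append
theorem r2iLoopA_append (xs ys : List Char) (s : Int × Int) :
    r2iLoopA (xs ++ ys) s = (r2iLoopA xs s).bind (r2iLoopA ys) := by
  induction xs generalizing s with
  | nil => simp [r2iLoopA]
  | cons c cs ih =>
    obtain ⟨result, prev⟩ := s
    simp only [List.cons_append, r2iLoopA]
    cases romanValuesA.get? c with
    | none => rfl
    | some v => exact ih _

-- shifting the forward-scan accumulator
theorem r2iLoopB_shift (cs : List Char) (t d : Int) :
    r2iLoopB cs (t + d) = (r2iLoopB cs t).map (· + d) := by
  induction cs generalizing t with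
  | nil => simp [r2iLoopB]
  | cons c cs ih =>
    simp only [r2iLoopB]
    cases romanValuesB.get? c with
    | none => rfl
    | some v =>
      cases cs with
      | nil => simp only [Option.map_some]; ring_nf
      | cons c2 cs' =>
        dsimp only
        cases romanValuesB.get? c2 with
        | none => rfl
        | some v2 =>
          by_cases hlt : v < v2
          · simp only [if_pos hlt]; rw [show t + d - v = (t - v) + d by ring, ih]
          · simp only [if_neg hlt]; rw [show t + d + v = (t + v) + d by ring, ih]

theorem r2iLoopB_shift_sub (cs : List Char) (t d : Int) :
    r2iLoopB cs (t - d) = (r2iLoopB cs t).map (· - d) := by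
  have h := r2iLoopB_shift cs t (-d)
  simpa [sub_eq_add_neg] using h

theorem r2iLoopB_cons_cons (c c2 : Char) (cs : List Char) (t v v2 : Int)
    (hv : romanValuesB.get? c = some v) (hv2 : romanValuesB.get? c2 = some v2) :
    r2iLoopB (c :: c2 :: cs) t = r2iLoopB (c2 :: cs) (if v < v2 then t - v else t + v) := by
  conv_lhs => rw [r2iLoopB]
  rw [hv]
  dsimp only
  rw [hv2]

-- master bridge: A's reversed scan = B's forward scan (with the final prev recorded)
theorem r2i_master (cs : List Char) (total : Int) :
    r2iLoopA cs.reverse (total, 0) =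
      match cs with
      | [] => some (total, 0)
      | c :: _ =>
        match romanValuesA.get? c with
        | none => none
        | some v => (r2iLoopB cs total).map (fun r => (r, v)) := by
  induction cs generalizing total with
  | nil => rfl
  | cons c cs ih =>
    rw [List.reverse_cons, r2iLoopA_append, ih]
    cases cs with
    | nil =>
      cases hv : romanValuesA.get? c with
      | none => simp [r2iLoopA, hv]
      | some v =>
        have hvp := valA_pos hv
        simp [r2iLoopA, r2iLoopB, valB_eq_valA, hv, show ¬ v < (0 : Int) by omega]
    | cons c2 cs' =>
      cases hv2 : romanValuesA.get? c2 with
      | none =>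
        cases hv : romanValuesA.get? c with
        | none => simp [r2iLoopA, hv, hv2]
        | some v => simp [r2iLoopA, r2iLoopB, valB_eq_valA, hv, hv2]
      | some v2 =>
        cases hv : romanValuesA.get? c with
        | none =>
          cases hf : r2iLoopB (c2 :: cs') total <;>
            simp [r2iLoopA, hv, hv2]
        | some v =>
          have hvB : romanValuesB.get? c = some v := by rw [valB_eq_valA]; exact hv
          have hv2B : romanValuesB.get? c2 = some v2 := by rw [valB_eq_valA]; exact hv2
          rw [r2iLoopB_cons_cons c c2 cs' total v v2 hvB hv2B]
          by_cases hlt : v < v2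
          · rw [if_pos hlt, r2iLoopB_shift_sub]
            cases hf : r2iLoopB (c2 :: cs') total with
            | none => simp [hv, hv2]
            | some r => simp [r2iLoopA, hv, hv2, hlt]
          · rw [if_neg hlt, r2iLoopB_shift]
            cases hf : r2iLoopB (c2 :: cs') total with
            | none => simp [hv, hv2]
            | some r => simp [r2iLoopA, hv, hv2, hlt]

-- positivity invariant for A's scan: the accumulated result stays ≥ the previous value
theorem r2iLoopA_inv (cs : List Char) (result prev r p : Int)
    (h : r2iLoopA cs (result, prev) = some (r, p))
    (h1 : prev ≤ result) (h2 : prev = 0 ∨ ∃ c, romanValuesA.get? c = some prev) :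
    p ≤ r ∧ (p = 0 ∨ ∃ c, romanValuesA.get? c = some p) := by
  induction cs generalizing result prev with
  | nil =>
    simp only [r2iLoopA, Option.some.injEq, Prod.mk.injEq] at h
    obtain ⟨hr, hp⟩ := h
    subst hr; subst hp
    exact ⟨h1, h2⟩
  | cons c cs ih =>
    simp only [r2iLoopA] at h
    cases hv : romanValuesA.get? c with
    | none => rw [hv] at h; exact absurd h (by simp)
    | some v =>
      rw [hv] at h
      have hvp := valA_pos hv
      apply ih _ _ h
      · by_cases hlt : v < prev
        · have hprev : ∃ d, romanValuesA.get? d = some prev := by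
            rcases h2 with h2 | h2
            · omega
            · exact h2
          obtain ⟨d, hd⟩ := hprev
          have := valA_double hv hd hlt
          rw [if_pos hlt]; omega
        · have hprev0 : 0 ≤ prev := by
            rcases h2 with h2 | h2
            · omega
            · obtain ⟨d, hd⟩ := h2; have := valA_pos hd; omega
          rw [if_neg hlt]; omega
      · exact Or.inr ⟨c, hv⟩

theorem romanToIntegerA_nonneg {s : String} {n : Int} (h : romanToIntegerA s = some n) : 0 ≤ n := by
  unfold romanToIntegerA at h
  rw [PySem.List.slice?_none_none_neg_one, Option.getD_some] at h
  cases hr : r2iLoopA s.toList.reverse (0, 0) with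
  | none => rw [hr] at h; exact absurd h (by simp)
  | some rp =>
    obtain ⟨r, p⟩ := rp
    rw [hr] at h
    simp only [Option.map_some, Option.some.injEq] at h
    subst h
    have hinv := r2iLoopA_inv s.toList.reverse 0 0 r p hr le_rfl (Or.inl rfl)
    rcases hinv.2 with hp | ⟨c, hc⟩
    · have := hinv.1; omega
    · have := valA_pos hc; have := hinv.1; omega

-- greedy conversion = per-digit lookup tables, checked on all of [0, 1000]
set_option maxRecDepth 100000 in
theorem conv_eq (n : Int) (h0 : 0 ≤ n) (h1 : n ≤ 1000) : integerToRomanA n = digitsToRomanB n := by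
  have key : ∀ k ∈ List.range 1001, integerToRomanA (k : Int) = digitsToRomanB (k : Int) := by
    decide
  have hn : n = ((n.toNat : Nat) : Int) := by omega
  rw [hn]
  exact key n.toNat (List.mem_range.mpr (by omega))

theorem r2i_eq_list (cs : List Char) : (r2iLoopA cs.reverse (0, 0)).map (·.1) = r2iLoopB cs 0 := by
  rw [r2i_master]
  cases cs with
  | nil => rfl
  | cons c cs' =>
    dsimp only
    cases hv : romanValuesA.get? c with
    | none =>
      cases cs' with
      | nil => simp [r2iLoopB, valB_eq_valA, hv]
      | cons c2 cs'' => simp [r2iLoopB, valB_eq_valA, hv]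
    | some v => cases r2iLoopB (c :: cs') 0 <;> simp

theorem romanToInteger_eq (s : String) : romanToIntegerA s = romanToIntegerB s := by
  unfold romanToIntegerA romanToIntegerB
  rw [PySem.List.slice?_none_none_neg_one, Option.getD_some]
  exact r2i_eq_list s.toList

-- ===== VERDICT (by name: the statement is the Claim_ definition above) =====
theorem multiply_roman_numerals_spec : Claim_equal_multiply_roman_numerals := by
  intro num1 num2 _
  unfold Spec_multiply_roman_numerals multiply_roman_numerals multiply_roman_numerals_alt
  rw [← romanToInteger_eq, ← romanToInteger_eq]
  cases h1 : romanToIntegerA num1 with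
  | none => rfl
  | some n1 =>
    cases h2 : romanToIntegerA num2 with
    | none => rfl
    | some n2 =>
      simp only
      by_cases hp : n1 * n2 > 1000
      · simp [hp]
      · simp [hp]
        exact conv_eq _ (mul_nonneg (romanToIntegerA_nonneg h1) (romanToIntegerA_nonneg h2))
          (by omega)
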